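-- pv_equiv track=rewrite | github.com/aliachawaf/Projet-Math-de-la-Decision | algo.py | checkIfPossible
-- ===== SOURCE A (Python) =====
-- def checkIfPossible(preferences):
--     possible = True
--     nbPotentialMate = 0
--
--     for i in range(len(preferences)):
--         for j in range(len(preferences)):
--             nbPotentialMate += preferences[i][j] + preferences[j][i]
--
--         if nbPotentialMate == -2:
--             # if yes, means that the student i cannot be assigned to a group
--             possible = False
--
--         nbPotentialMate = 0
--
--     return possible
-- ===== SOURCE B (Python) =====
-- def checkIfPossible(preferences):
--     n = len(preferences)
--     rowS = []
--     colS = [0] * n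
--     for row in preferences:
--         head = [row[j] for j in range(n)]
--         rowS.append(sum(head))
--         colS = [c + v for c, v in zip(colS, head)]
--     return all(r + c != -2 for r, c in zip(rowS, colS))
-- ===== Notes on version B (the rewrite author's own statement) =====
-- stated objective: alternative
-- what changed: B replaces A's fused index-based nested loops (per-i accumulate row i plus column i, test, reset) with a single streaming pass over the rows that maintains a running column-sum vector by elementwise vector addition and a list of row sums, followed by a separate zipped scan.
import Mathlib
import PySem

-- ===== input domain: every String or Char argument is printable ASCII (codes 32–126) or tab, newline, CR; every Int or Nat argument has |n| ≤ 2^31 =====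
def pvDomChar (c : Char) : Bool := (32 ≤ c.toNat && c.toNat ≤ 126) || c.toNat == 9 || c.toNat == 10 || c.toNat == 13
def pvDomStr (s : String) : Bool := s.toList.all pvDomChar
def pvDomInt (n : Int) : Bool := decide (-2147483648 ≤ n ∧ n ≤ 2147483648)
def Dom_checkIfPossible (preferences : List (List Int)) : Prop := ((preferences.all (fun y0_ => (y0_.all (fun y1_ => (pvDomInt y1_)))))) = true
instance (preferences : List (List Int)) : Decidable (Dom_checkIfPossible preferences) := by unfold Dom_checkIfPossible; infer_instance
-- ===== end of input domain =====

-- B replaces A's fused index-based nested loops with one streaming pass over the rows (running column-sum vector + row-sum list) and a separate zipped scan; same cost, different traversal.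


-- ===== PORT A =====
-- literal port of A: for i in range(n): inner loop accumulates preferences[i][j]+preferences[j][i],
-- then tests == -2 and resets the accumulator (reset folded into starting the next inner loop at 0).
-- Indexing uses getD; Pre_ guarantees every access is in range, matching Python exactly there.
def checkIfPossible (preferences : List (List Int)) : Bool :=
  let n := preferences.length
  (List.range n).foldl
    (fun possible i =>
      let nbPotentialMate : Int :=
        (List.range n).foldl
          (fun acc j => acc + ((preferences.getD i []).getD j 0 + (preferences.getD j []).getD i 0)) 0
      if nbPotentialMate = -2 then false else possible)
    true

-- ===== PORT B =====
-- streaming pass: per row, head = [row[j] for j in range(n)]; append sum(head) to rowS and add head elementwise to colS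
def checkIfPossible_alt (preferences : List (List Int)) : Bool :=
  let n := preferences.length
  let st := preferences.foldl
    (fun (st : List Int × List Int) row =>
      let head := (List.range n).map (fun j => row.getD j 0)
      (st.1 ++ [head.sum], List.zipWith (· + ·) st.2 head))
    ([], List.replicate n 0)
  (st.1.zip st.2).all (fun rc => !(rc.1 + rc.2 = -2))

-- ===== PRECONDITION & SPEC =====
-- Pre_ excludes ragged inputs with a row shorter than the number of rows: Python A raises IndexError there.
def Pre_checkIfPossible (preferences : List (List Int)) : Prop :=
  ∀ r ∈ preferences, preferences.length ≤ r.length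
instance (preferences : List (List Int)) : Decidable (Pre_checkIfPossible preferences) := by unfold Pre_checkIfPossible; infer_instance

def pvWitness_checkIfPossible : List (List Int) := [[0, -1], [-1, 0]]

def Spec_checkIfPossible (preferences : List (List Int)) (out : Bool) : Prop := out = checkIfPossible_alt preferences
instance (preferences : List (List Int)) (out : Bool) : Decidable (Spec_checkIfPossible preferences out) := by unfold Spec_checkIfPossible; infer_instance

-- ===== CLAIM (what is proved, stated in full; the proofs are below) =====
def Claim_equal_checkIfPossible : Prop := ∀ (preferences : List (List Int)), Dom_checkIfPossible preferences → Pre_checkIfPossible preferences → Spec_checkIfPossible preferences (checkIfPossible preferences)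

-- ===== LEMMAS AND PROOFS =====

-- A's inner loop splits into the two column sums
theorem pv_inner_split (x y : Nat → Int) (l : List Nat) (acc : Int) :
    l.foldl (fun a j => a + (x j + y j)) acc
      = acc + (l.map x).sum + (l.map y).sum := by
  induction l generalizing acc with
  | nil => simp
  | cons h t ih => simp [List.foldl, ih]; ring

-- A's outer loop is an all-quantified test
theorem pv_outer_all (f : Nat → Int) (l : List Nat) (b : Bool) :
    l.foldl (fun possible i => if f i = -2 then false else possible) b
      = (b && l.all (fun i => !decide (f i = -2))) := by
  induction l generalizing b with
  | nil => simp
  | cons h t ih =>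
    simp only [List.foldl, List.all_cons, ih]
    by_cases hf : f h = -2 <;> simp [hf]

-- indexing a list over range of its length reproduces the list
theorem pv_map_range_getD {α : Type} (L : List α) (d : α) :
    (List.range L.length).map (fun j => L.getD j d) = L := by
  apply List.ext_getElem
  · simp
  · intro i h1 h2
    simp [List.getD_eq_getElem?_getD, List.getElem?_eq_getElem h2]

-- zipWith (+) with an equal-or-shorter second list of full length n
theorem pv_zipWith_add (cs hd : List Int) (n : Nat) (h1 : cs.length = n) (h2 : hd.length = n) :
    List.zipWith (· + ·) cs hd = (List.range n).map (fun i => cs.getD i 0 + hd.getD i 0) := by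
  apply List.ext_getElem
  · simp [h1, h2]
  · intro i hi hi'
    simp at hi
    simp [List.getD_eq_getElem?_getD,
      List.getElem?_eq_getElem (by omega : i < cs.length),
      List.getElem?_eq_getElem (by omega : i < hd.length)]

-- B's fold invariant: after the streaming pass, fst = accumulated row sums, snd = running column sums
theorem pv_fold_inv (n : Nat) (L : List (List Int)) (rs cs : List Int)
    (hcs : cs.length = n) :
    L.foldl
      (fun (st : List Int × List Int) row =>
        ((st.1 ++ [((List.range n).map (fun j => row.getD j 0)).sum],
          List.zipWith (· + ·) st.2 ((List.range n).map (fun j => row.getD j 0))) : List Int × List Int))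
      (rs, cs)
    = (rs ++ L.map (fun row => ((List.range n).map (fun j => row.getD j 0)).sum),
       (List.range n).map (fun i => cs.getD i 0 + (L.map (fun row => row.getD i 0)).sum)) := by
  induction L generalizing rs cs with
  | nil =>
    simp only [List.foldl_nil, List.map_nil, List.append_nil, List.sum_nil, add_zero]
    rw [← hcs, pv_map_range_getD]
  | cons row t ih =>
    have hhd : ((List.range n).map (fun j => row.getD j 0)).length = n := by simp
    rw [List.foldl_cons, ih _ _ (by rw [List.length_zipWith, hcs, hhd]; simp)]
    refine Prod.ext (by simp) ?_
    apply List.map_congr_left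
    intro i hi
    simp at hi
    rw [pv_zipWith_add cs _ n hcs hhd]
    simp [List.getD_eq_getElem?_getD, hi]
    ring

-- Bool.all respects pointwise equality on members
theorem pv_all_congr {α : Type} (l : List α) (p q : α → Bool)
    (h : ∀ a ∈ l, p a = q a) : l.all p = l.all q := by
  induction l with
  | nil => rfl
  | cons a t ih =>
    simp only [List.all_cons, h a (by simp), ih (fun b hb => h b (by simp [hb]))]

-- a list map as a map over range
theorem pv_map_as_range {α : Type} (L : List α) (d : α) (f : α → Int) :
    L.map f = (List.range L.length).map (fun i => f (L.getD i d)) := by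
  conv_lhs => rw [← pv_map_range_getD L d]
  rw [List.map_map]
  rfl

-- ===== VERDICT (by name: the statement is the Claim_ definition above) =====
theorem checkIfPossible_spec : Claim_equal_checkIfPossible := by
  intro P _ _
  simp only [Spec_checkIfPossible, checkIfPossible, checkIfPossible_alt]
  rw [pv_fold_inv P.length P [] (List.replicate P.length 0) (by simp)]
  simp only [List.nil_append, pv_outer_all, Bool.true_and, pv_inner_split, zero_add]
  rw [pv_map_as_range P [] (fun row => ((List.range P.length).map (fun j => row.getD j 0)).sum),
    List.zip_map']
  simp only [List.all_map]
  refine pv_all_congr _ _ _ fun i hi => ?_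
  simp only [List.mem_range] at hi
  simp only [Function.comp_apply]
  rw [pv_map_as_range P [] (fun row => row.getD i 0)]
  simp [List.getD_eq_getElem?_getD, hi]
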